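-- pv_equiv track=rewrite | github.com/dreambrother/algorithms | scc/scc.py | _dfs_loop
-- ===== SOURCE A (Python) =====
-- def _dfs_loop(edges_list):
--     loop_state = LoopState()
--     for n in reversed(edges_list.keys()):
--         if n not in loop_state.explored:
--             loop_state.current_leader = n
--             loop_state.s[n] = 0
--             _dfs(edges_list, n, loop_state)
--     return loop_state.finish_times, loop_state.s
--
-- def _dfs(edges_list, node, loop_state):
--     loop_state.explored.add(node)
--     loop_state.s[loop_state.current_leader] += 1
--     if node in edges_list:
--         for n in edges_list[node]:
--             if n not in loop_state.explored:
--                 _dfs(edges_list, n, loop_state)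
--     loop_state.time += 1
--     loop_state.finish_times[node] = loop_state.time
--
-- class LoopState:
--     def __init__(self):
--         self.time = 0
--         self.finish_times = {}
--         self.explored = set()
--         self.s = {}
--         self.current_leader = None
-- ===== SOURCE B (Python) =====
-- def _dfs_loop(edges_list):
--     # Iterative DFS with an explicit stack instead of recursion; same finish
--     # times and SCC-size dict (identical insertion order) as the recursive version.
--     time = 0
--     finish_times = {}
--     explored = set()
--     s = {}
--     for r in reversed(list(edges_list.keys())):
--         if r not in explored:
--             s[r] = 0
--             explored.add(r)
--             s[r] += 1
--             stack = [(r, list(edges_list.get(r, [])))]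
--             while stack:
--                 node, rest = stack[-1]
--                 if rest:
--                     c = rest[0]
--                     stack[-1] = (node, rest[1:])
--                     if c not in explored:
--                         explored.add(c)
--                         s[r] += 1
--                         stack.append((c, list(edges_list.get(c, []))))
--                 else:
--                     stack.pop()
--                     time += 1
--                     finish_times[node] = time
--     return finish_times, s
-- ===== Notes on version B (the rewrite author's own statement) =====
-- stated objective: alternative
-- what changed: The recursive _dfs helper is replaced by an iterative DFS with an explicit stack of (node, remaining-children) frames inside a single loop; finish times are assigned on pop and SCC sizes incremented on first discovery, producing identical dicts.
import Mathlib
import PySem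

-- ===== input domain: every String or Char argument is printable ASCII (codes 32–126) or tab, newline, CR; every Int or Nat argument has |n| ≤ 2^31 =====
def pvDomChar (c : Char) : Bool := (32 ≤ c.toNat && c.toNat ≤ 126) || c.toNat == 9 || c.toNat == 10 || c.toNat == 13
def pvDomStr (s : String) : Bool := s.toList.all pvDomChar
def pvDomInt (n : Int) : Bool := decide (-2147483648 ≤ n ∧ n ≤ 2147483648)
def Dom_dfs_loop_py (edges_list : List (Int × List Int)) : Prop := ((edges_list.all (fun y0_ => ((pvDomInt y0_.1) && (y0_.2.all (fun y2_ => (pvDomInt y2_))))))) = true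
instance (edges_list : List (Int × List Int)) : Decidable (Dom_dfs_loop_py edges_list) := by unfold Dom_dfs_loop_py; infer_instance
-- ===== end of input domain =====

-- B replaces the recursive _dfs with an explicit-stack iterative DFS (alternative decomposition, same cost).
-- The shared LoopState of the Python (time, finish_times, explored, s); current_leader is constant during each
-- _dfs call tree, so it is carried as a parameter of the DFS helpers.
structure PvState where
  time : Int
  finish : PySem.Dict Int Int
  explored : PySem.Set Int
  s : PySem.Dict Int Int
deriving Repr, DecidableEq

-- loop_state.explored.add(node); loop_state.s[current_leader] += 1  (leader is always a key of s here)
def pvVisit (leader node : Int) (st : PvState) : PvState :=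
  { st with explored := PySem.Set.add st.explored node,
            s := st.s.modify leader 0 (· + 1) }

-- loop_state.time += 1; loop_state.finish_times[node] = loop_state.time
def pvFinish (node : Int) (st : PvState) : PvState :=
  { st with time := st.time + 1, finish := st.finish.insert node (st.time + 1) }

-- ===== PORT A =====
-- _dfs, as mutual recursion over the node and its child list; `fuel` is a totality guard only
-- (one unit per discovered node; the top level supplies more fuel than there are mentioned nodes,
-- and the claims below hold for every fuel). 'if node in edges_list: for n in edges_list[node]'
-- is the fold over d.getD node [] (exact: an absent key contributes the empty iteration).
mutual
def pvDfsA (d : PySem.Dict Int (List Int)) (leader : Int) (fuel : Nat) (st : PvState) (node : Int) :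
    PvState × Nat :=
  let p := pvDfsListA d leader fuel (pvVisit leader node st) (d.getD node [])
  (pvFinish node p.1, p.2)
termination_by (fuel + 1, 0)

def pvDfsListA (d : PySem.Dict Int (List Int)) (leader : Int) (fuel : Nat) (st : PvState) (cs : List Int) :
    PvState × Nat :=
  match cs with
  | [] => (st, fuel)
  | c :: rest =>
    if PySem.Set.contains st.explored c then pvDfsListA d leader fuel st rest
    else
      match fuel with
      | 0 => pvDfsListA d leader 0 st rest          -- unreachable with the supplied fuel
      | f + 1 =>
        let p := pvDfsA d leader f st c
        pvDfsListA d leader (min p.2 f) p.1 rest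
termination_by (fuel, cs.length + 1)
end

def dfs_loop_py (edges_list : List (Int × List Int)) : (List (Int × Int)) × (List (Int × Int)) :=
  let d := PySem.Dict.ofList edges_list
  let fuel := (edges_list.flatMap (fun p => p.1 :: p.2)).length
  let fin := d.keys.reverse.foldl
    (fun st n =>
      if PySem.Set.contains st.explored n then st
      else (pvDfsA d n fuel { st with s := st.s.insert n 0 } n).1)
    ⟨0, PySem.Dict.empty, PySem.Set.empty, PySem.Dict.empty⟩
  (fin.finish.items, fin.s.items)

-- ===== PORT B =====
-- the while-loop over the explicit stack of (node, remaining children) frames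
def pvLoopB (d : PySem.Dict Int (List Int)) (leader : Int) (fuel : Nat) (st : PvState)
    (stack : List (Int × List Int)) : PvState :=
  match stack with
  | [] => st
  | (node, []) :: fr => pvLoopB d leader fuel (pvFinish node st) fr
  | (node, c :: rest) :: fr =>
    if PySem.Set.contains st.explored c then pvLoopB d leader fuel st ((node, rest) :: fr)
    else
      match fuel with
      | 0 => pvLoopB d leader 0 st ((node, rest) :: fr)   -- unreachable with the supplied fuel
      | f + 1 => pvLoopB d leader f (pvVisit leader c st) ((c, d.getD c []) :: (node, rest) :: fr)
termination_by (fuel, (stack.map (fun p => p.2.length + 1)).sum)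

def dfs_loop_py_alt (edges_list : List (Int × List Int)) : (List (Int × Int)) × (List (Int × Int)) :=
  let d := PySem.Dict.ofList edges_list
  let fuel := (edges_list.flatMap (fun p => p.1 :: p.2)).length
  let fin := d.keys.reverse.foldl
    (fun st r =>
      if PySem.Set.contains st.explored r then st
      else pvLoopB d r fuel (pvVisit r r { st with s := st.s.insert r 0 }) [(r, d.getD r [])])
    ⟨0, PySem.Dict.empty, PySem.Set.empty, PySem.Dict.empty⟩
  (fin.finish.items, fin.s.items)

-- ===== PRECONDITION & SPEC =====
def Spec_dfs_loop_py (edges_list : List (Int × List Int)) (out : (List (Int × Int)) × (List (Int × Int))) : Prop := out = dfs_loop_py_alt edges_list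
instance (edges_list : List (Int × List Int)) (out : (List (Int × Int)) × (List (Int × Int))) : Decidable (Spec_dfs_loop_py edges_list out) := by unfold Spec_dfs_loop_py; infer_instance

-- ===== CLAIM (what is proved, stated in full; the proofs are below) =====
def Claim_equal_dfs_loop_py : Prop := ∀ (edges_list : List (Int × List Int)), Dom_dfs_loop_py edges_list → Spec_dfs_loop_py edges_list (dfs_loop_py edges_list)

-- ===== LEMMAS AND PROOFS =====
theorem pv_fuel_le (d : PySem.Dict Int (List Int)) (leader : Int) :
    ∀ fuel cs st, (pvDfsListA d leader fuel st cs).2 ≤ fuel := by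
  intro fuel
  induction fuel using Nat.strong_induction_on with
  | _ fuel IH =>
    intro cs
    induction cs with
    | nil => intro st; simp [pvDfsListA]
    | cons c rest IHcs =>
      intro st
      rw [pvDfsListA.eq_def]
      simp only []
      split
      · exact IHcs st
      · match fuel, IH, IHcs with
        | 0, IH, IHcs => simp only []; exact IHcs st
        | f + 1, IH, IHcs =>
          simp only []
          refine le_trans (IH (min (pvDfsA d leader f st c).2 f) ?_ rest _) ?_
          · omega
          · omega

-- the stack machine, run with one frame (n, cs) on top, performs exactly the recursive child
-- loop on cs followed by finishing n, then continues with the rest of the stack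
theorem pv_sim (d : PySem.Dict Int (List Int)) (leader : Int) :
    ∀ fuel cs st n fr,
      pvLoopB d leader fuel st ((n, cs) :: fr)
        = pvLoopB d leader (pvDfsListA d leader fuel st cs).2
            (pvFinish n (pvDfsListA d leader fuel st cs).1) fr := by
  intro fuel
  induction fuel using Nat.strong_induction_on with
  | _ fuel IH =>
    intro cs
    induction cs with
    | nil =>
        intro st n fr
        rw [pvLoopB.eq_def, pvDfsListA.eq_def]
    | cons c rest IHcs =>
      intro st n fr
      rw [pvLoopB.eq_def, pvDfsListA.eq_def]
      simp only []
      split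
      · exact IHcs st n fr
      · match fuel, IH, IHcs with
        | 0, IH, IHcs => simp only []; exact IHcs st n fr
        | f + 1, IH, IHcs =>
          simp only []
          rw [IH f (by omega) (d.getD c []) (pvVisit leader c st) c ((n, rest) :: fr)]
          rw [IH (pvDfsListA d leader f (pvVisit leader c st) (d.getD c [])).2
                (Nat.lt_succ_of_le (pv_fuel_le d leader f _ _)) rest _ n fr]
          rw [pvDfsA]
          simp only [Nat.min_eq_left (pv_fuel_le d leader f (d.getD c []) (pvVisit leader c st))]

-- ===== VERDICT (by name: the statement is the Claim_ definition above) =====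
theorem dfs_loop_py_spec : Claim_equal_dfs_loop_py := by
  unfold Claim_equal_dfs_loop_py
  intro edges_list _
  unfold Spec_dfs_loop_py dfs_loop_py dfs_loop_py_alt
  simp only []
  congr 2 <;>
  · congr 1
    apply PySem.List.foldl_congr_mem
    intro st r _
    split
    · rfl
    · rw [pv_sim, pvDfsA, pvLoopB.eq_def]
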